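-- pv_equiv track=rewrite | github.com/desecho/movies | src/moviesapp/tmdb.py | _sort_by_date
-- ===== SOURCE A (Python) =====
-- from operator import itemgetter
-- from typing import Any, Dict, List, Optional
--
-- def _sort_by_date(movies: List[Dict[str, Any]]) -> List[Dict[str, Any]]:
--     """Sort movies by date."""
--     movies_with_date = []
--     movies_without_date = []
--     for movie in movies:
--         if movie["releaseDate"]:
--             movies_with_date.append(movie)
--         else:
--             movies_without_date.append(movie)
--     movies_with_date = sorted(movies_with_date, key=itemgetter("releaseDate"), reverse=True)
--     movies = movies_with_date + movies_without_date
--     return movies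
-- ===== SOURCE B (Python) =====
-- def _sort_by_date(movies):
--     """Sort movies by date: one stable sorted() call with a composite key
--     (dated-before-undated, then date), reverse=True."""
--     return sorted(movies, key=lambda m: (bool(m["releaseDate"]), m["releaseDate"] or ""), reverse=True)
-- ===== Notes on version B (the rewrite author's own statement) =====
-- stated objective: idiomatic
-- what changed: Replaced the two-list partition plus a sort of the dated sublist and concatenation by a single stable sorted() call with a composite key (bool(date), date) and reverse=True.
import Mathlib
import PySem

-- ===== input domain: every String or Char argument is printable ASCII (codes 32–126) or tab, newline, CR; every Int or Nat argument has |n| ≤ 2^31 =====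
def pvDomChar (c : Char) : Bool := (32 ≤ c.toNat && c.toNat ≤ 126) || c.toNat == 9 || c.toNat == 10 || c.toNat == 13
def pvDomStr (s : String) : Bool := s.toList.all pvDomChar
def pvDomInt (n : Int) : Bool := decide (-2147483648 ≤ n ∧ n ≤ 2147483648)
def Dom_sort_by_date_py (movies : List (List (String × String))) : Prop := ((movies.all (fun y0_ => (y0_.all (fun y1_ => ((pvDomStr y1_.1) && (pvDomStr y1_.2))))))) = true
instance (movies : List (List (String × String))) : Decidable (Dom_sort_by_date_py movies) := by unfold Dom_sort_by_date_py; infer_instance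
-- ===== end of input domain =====

-- B replaces the partition + sort-of-the-dated-sublist + concatenation by one stable
-- composite-key sort (idiomatic; same cost).

-- movie["releaseDate"] (Pre_ guarantees the key is present, so getD never hits its default)
def pvRd (m : List (String × String)) : String := (PySem.Dict.mk m).getD "releaseDate" ""

-- ===== PORT A =====
def sort_by_date_py (movies : List (List (String × String))) : List (List (String × String)) :=
  let p := movies.foldl
    (fun (p : List (List (String × String)) × List (List (String × String))) movie =>
      if pvRd movie ≠ "" then (p.1 ++ [movie], p.2) else (p.1, p.2 ++ [movie]))
    ([], [])
  PySem.List.sorted p.1 pvRd true ++ p.2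

-- ===== PORT B =====
-- bool(m["releaseDate"])
def pvDated (m : List (String × String)) : Bool := pvRd m ≠ ""

-- key = (bool(m["releaseDate"]), m["releaseDate"] or ""): on strings, `v or ""` is v itself
def sort_by_date_py_alt (movies : List (List (String × String))) : List (List (String × String)) :=
  PySem.List.sorted2 movies pvDated pvRd true

-- ===== PRECONDITION & SPEC =====
-- Pre_: every movie dict has the key "releaseDate"; otherwise A (and B) raise KeyError.
def Pre_sort_by_date_py (movies : List (List (String × String))) : Prop :=
  ∀ m ∈ movies, "releaseDate" ∈ m.map Prod.fst
instance (movies : List (List (String × String))) : Decidable (Pre_sort_by_date_py movies) := by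
  unfold Pre_sort_by_date_py; infer_instance
def pvWitness_sort_by_date_py : (List (List (String × String))) :=
  [[("releaseDate", "2020-01-01")], [("releaseDate", "")], [("releaseDate", "2021-05-02")]]

def Spec_sort_by_date_py (movies : List (List (String × String))) (out : List (List (String × String))) : Prop := out = sort_by_date_py_alt movies
instance (movies : List (List (String × String))) (out : List (List (String × String))) : Decidable (Spec_sort_by_date_py movies out) := by unfold Spec_sort_by_date_py; infer_instance

-- ===== CLAIM (what is proved, stated in full; the proofs are below) =====
def Claim_equal_sort_by_date_py : Prop := ∀ (movies : List (List (String × String))), Dom_sort_by_date_py movies → Pre_sort_by_date_py movies → Spec_sort_by_date_py movies (sort_by_date_py movies)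

-- ===== LEMMAS AND PROOFS =====

-- the comparator insertBy uses inside sorted2 … true
def pvBef2 (a b : List (String × String)) : Bool :=
  decide (pvDated b < pvDated a) || !decide (pvDated a < pvDated b) && decide (pvRd b < pvRd a)

-- the comparator insertBy uses inside sorted … pvRd true
def pvBef1 (a b : List (String × String)) : Bool := decide (pvRd b < pvRd a)

theorem insertBy_congr {α : Type} (bef bef' : α → α → Bool) (x : α) (ys : List α)
    (h : ∀ y ∈ ys, bef x y = bef' x y) :
    PySem.List.insertBy bef x ys = PySem.List.insertBy bef' x ys := by
  induction ys with
  | nil => rfl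
  | cons y ys ih =>
    simp only [PySem.List.insertBy]
    rw [h y (by simp)]
    split
    · rfl
    · rw [ih (fun z hz => h z (by simp [hz]))]

theorem insertBy_append_of_forall_before {α : Type} (bef : α → α → Bool) (x : α)
    (S U : List α) (h : ∀ y ∈ U, bef x y = true) :
    PySem.List.insertBy bef x (S ++ U) = PySem.List.insertBy bef x S ++ U := by
  induction S with
  | nil =>
    cases U with
    | nil => rfl
    | cons u us => simp [PySem.List.insertBy, h u (by simp)]
  | cons s ss ih =>
    simp only [List.cons_append, PySem.List.insertBy]
    split
    · rfl
    · simp [ih]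

theorem partition_foldl (xs : List (List (String × String)))
    (p : List (List (String × String)) × List (List (String × String))) :
    xs.foldl
      (fun (p : List (List (String × String)) × List (List (String × String))) movie =>
        if pvRd movie ≠ "" then (p.1 ++ [movie], p.2) else (p.1, p.2 ++ [movie])) p
    = (p.1 ++ xs.filter pvDated, p.2 ++ xs.filter (fun m => !pvDated m)) := by
  induction xs generalizing p with
  | nil => simp
  | cons x xs ih =>
    simp only [List.foldl_cons, List.filter_cons, ih]
    by_cases h : pvRd x = ""
    · simp [pvDated, h]
    · simp [pvDated, h]

theorem mem_filter_dated (y : List (String × String)) (xs : List (List (String × String)))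
    (h : y ∈ xs.filter pvDated) : pvDated y = true := (List.mem_filter.mp h).2

theorem sorted2_eq_split (xs : List (List (String × String))) :
    PySem.List.sorted2 xs pvDated pvRd true
    = PySem.List.sorted (xs.filter pvDated) pvRd true ++ xs.filter (fun m => !pvDated m) := by
  induction xs using List.reverseRecOn with
  | nil => rfl
  | append_singleton xs x ih =>
    have h2 : PySem.List.sorted2 (xs ++ [x]) pvDated pvRd true
        = PySem.List.insertBy pvBef2 x (PySem.List.sorted2 xs pvDated pvRd true) := by
      simp only [PySem.List.sorted2, List.foldl_append, List.foldl_cons, List.foldl_nil]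
      rfl
    rw [h2, ih]
    by_cases hx : pvDated x = true
    · -- dated x: it is inserted inside the dated prefix, before all undated tail elements
      rw [insertBy_append_of_forall_before pvBef2 x _ _ (by
        intro y hy
        have hyu : pvDated y = false := by
          have := (List.mem_filter.mp hy).2; simpa using this
        simp [pvBef2, hx, hyu])]
      have hcong : PySem.List.insertBy pvBef2 x (PySem.List.sorted (xs.filter pvDated) pvRd true)
          = PySem.List.insertBy pvBef1 x (PySem.List.sorted (xs.filter pvDated) pvRd true) := by
        apply insertBy_congr
        intro y hy
        have hyd : pvDated y = true :=
          mem_filter_dated y xs ((PySem.List.mem_sorted _ _ _ _).mp hy)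
        simp [pvBef2, pvBef1, hx, hyd]
      have h1 : PySem.List.sorted ((xs.filter pvDated) ++ [x]) pvRd true
          = PySem.List.insertBy pvBef1 x (PySem.List.sorted (xs.filter pvDated) pvRd true) := by
        simp only [PySem.List.sorted, List.foldl_append, List.foldl_cons, List.foldl_nil]
        rfl
      rw [hcong, ← h1]
      simp [List.filter_append, hx]
    · -- undated x: it compares before nothing, so it is appended at the very end
      have hx' : pvDated x = false := by simpa using hx
      have hrd : pvRd x = "" := by simpa [pvDated] using hx'
      rw [PySem.List.insertBy_of_forall_not_before pvBef2 x _ (by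
        intro y hy
        rcases List.mem_append.mp hy with hy | hy
        · have hyd : pvDated y = true :=
            mem_filter_dated y xs ((PySem.List.mem_sorted _ _ _ _).mp hy)
          simp [pvBef2, hx', hyd]
        · have hyu : pvDated y = false := by
            have := (List.mem_filter.mp hy).2; simpa using this
          have hyrd : pvRd y = "" := by simpa [pvDated] using hyu
          simp [pvBef2, hx', hyu, hyrd, hrd])]
      simp [List.filter_append, hx', List.append_assoc]

-- ===== VERDICT (by name: the statement is the Claim_ definition above) =====
theorem sort_by_date_py_spec : Claim_equal_sort_by_date_py := by
  intro movies _ _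
  unfold Spec_sort_by_date_py sort_by_date_py sort_by_date_py_alt
  rw [partition_foldl, sorted2_eq_split]
  simp
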